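-- pv_equiv track=rewrite | github.com/yshestakov/cpu11 | lsi/rom/tools/cp16mic.py | parse_gen
-- ===== SOURCE A (Python) =====
-- def parse_gen(string):
--     start = -1
--     quota = 0
--     slash = 0
--     pos = -1
--     for s in string:
--         pos += 1
--         if start < 0:
--             if s in ' \t':
--                 continue
--             if s == ',':
--                 yield ''
--                 start = -1
--                 quota = 0
--                 slash = 0
--                 continue
--             if s == ';':
--                 break
--             start = pos
--         if quota == 0:
--             if s == ',':
--                 yield string[start:pos]
--                 start = -1
--                 quota = 0
--                 slash = 0
--                 continue
--             if s == ';':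
--                 if pos != start:
--                     yield string[start:pos]
--                 start = -1
--                 break
--             if s == "'":
--                 quota = 1
--             elif s == '"':
--                 quota = 2
--             continue
--         if slash:
--             slash = 0
--             continue
--         if s == '\\':
--             slash = 1
--             continue
--         if quota == 1:
--             if s == "'":
--                 quota = 0
--         else:
--             if s == '"':
--                 quota = 0
--     if start >= 0:
--         yield string[start:]
-- ===== SOURCE B (Python) =====
-- def parse_gen(string):
--     n = len(string)
--     i = 0
--     while i < n:
--         while i < n and string[i] in ' \t':
--             i += 1
--         if i >= n:
--             return
--         c = string[i]
--         if c == ',':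
--             yield ''
--             i += 1
--             continue
--         if c == ';':
--             return
--         start = i
--         quote = ''
--         esc = False
--         while i < n:
--             c = string[i]
--             if quote:
--                 if esc:
--                     esc = False
--                 elif c == '\\':
--                     esc = True
--                 elif c == quote:
--                     quote = ''
--             else:
--                 if c == ',' or c == ';':
--                     break
--                 if c == "'" or c == '"':
--                     quote = c
--             i += 1
--         yield string[start:i]
--         if i < n and string[i] == ',':
--             i += 1
--         else:
--             return
-- ===== Notes on version B (the rewrite author's own statement) =====
-- stated objective: alternative
-- what changed: Replaces A's single for-loop state machine (start/quota/slash registers threaded across all fields) with an index-based two-level scanner: an outer while-loop per field that skips blanks and handles empty fields, and an inner cursor loop with local quote/escape state that finds each field's end, yielding the slice afterwards.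
import Mathlib
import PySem

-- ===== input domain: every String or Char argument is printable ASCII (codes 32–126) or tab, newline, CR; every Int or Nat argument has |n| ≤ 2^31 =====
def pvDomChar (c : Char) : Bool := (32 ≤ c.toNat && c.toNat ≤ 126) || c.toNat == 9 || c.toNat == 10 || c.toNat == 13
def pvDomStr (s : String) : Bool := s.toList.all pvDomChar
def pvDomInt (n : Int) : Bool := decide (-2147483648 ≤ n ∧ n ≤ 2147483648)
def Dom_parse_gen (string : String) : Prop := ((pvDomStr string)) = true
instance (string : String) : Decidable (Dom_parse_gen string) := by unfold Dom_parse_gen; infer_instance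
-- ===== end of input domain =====

-- B replaces A's flat for-loop state machine by an index-based two-level while-loop scanner
-- (outer loop per field, inner cursor loop with local quote/escape state); same O(n) cost.


-- ===== PORT A =====
-- the code after the for-loop: `if start >= 0: yield string[start:]`
def pgFin (string : String) (start : Int) (acc : List String) : List String :=
  if 0 ≤ start then acc ++ [PySem.Str.slice string (some start) none] else acc

-- A's for-loop; `pos` is the index of the head character (Python pre-increments pos
-- from -1 at the loop top, so at the top of each iteration pos = index of s).
-- Python's fall-through `start = pos` before the quota logic is `start1` below.
def pgLoop (string : String) : List Char → Int → Int → Nat → Nat → List String → List String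
  | [], _, start, _, _, acc => pgFin string start acc
  | s :: rest, pos, start, quota, slash, acc =>
    if start < 0 ∧ (s = ' ' ∨ s = '\t') then
      pgLoop string rest (pos + 1) start quota slash acc
    else if start < 0 ∧ s = ',' then
      pgLoop string rest (pos + 1) (-1) 0 0 (acc ++ [""])
    else if start < 0 ∧ s = ';' then
      pgFin string start acc
    else
      let start1 := if start < 0 then pos else start
      if quota = 0 then
        if s = ',' then
          pgLoop string rest (pos + 1) (-1) 0 0
            (acc ++ [PySem.Str.slice string (some start1) (some pos)])
        else if s = ';' then
          pgFin string (-1)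
            (if pos ≠ start1 then acc ++ [PySem.Str.slice string (some start1) (some pos)] else acc)
        else if s = '\'' then pgLoop string rest (pos + 1) start1 1 slash acc
        else if s = '"' then pgLoop string rest (pos + 1) start1 2 slash acc
        else pgLoop string rest (pos + 1) start1 quota slash acc
      else if slash ≠ 0 then pgLoop string rest (pos + 1) start1 quota 0 acc
      else if s = '\\' then pgLoop string rest (pos + 1) start1 quota 1 acc
      else if quota = 1 then
        if s = '\'' then pgLoop string rest (pos + 1) start1 0 slash acc
        else pgLoop string rest (pos + 1) start1 quota slash acc
      else
        if s = '"' then pgLoop string rest (pos + 1) start1 0 slash acc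
        else pgLoop string rest (pos + 1) start1 quota slash acc

def parse_gen (string : String) : List String :=
  pgLoop string string.toList 0 (-1) 0 0 []

-- ===== PORT B =====
-- `while i < n and string[i] in ' \t': i += 1`; the fuel argument (= n - i at every
-- call) only makes the while-loop's totality explicit.
def pbSkip (cs : List Char) (i : Nat) : Nat → Nat
  | 0 => i
  | fuel + 1 =>
    if h : i < cs.length then
      if cs[i] = ' ' ∨ cs[i] = '\t' then pbSkip cs (i + 1) fuel else i
    else i

-- B's inner while-loop: advance the cursor to the end of the field, maintaining the
-- local quote (Python's '' falsy string is `none`) and esc flags; fuel = n - i.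
def pbScan (cs : List Char) (quote : Option Char) (esc : Bool) (i : Nat) : Nat → Nat
  | 0 => i
  | fuel + 1 =>
    if h : i < cs.length then
      match quote with
      | some q =>
        if esc then pbScan cs (some q) false (i + 1) fuel
        else if cs[i] = '\\' then pbScan cs (some q) true (i + 1) fuel
        else if cs[i] = q then pbScan cs none false (i + 1) fuel
        else pbScan cs (some q) esc (i + 1) fuel
      | none =>
        if cs[i] = ',' ∨ cs[i] = ';' then i
        else if cs[i] = '\'' ∨ cs[i] = '"' then pbScan cs (some cs[i]) esc (i + 1) fuel
        else pbScan cs none esc (i + 1) fuel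
    else i

-- B's outer while-loop over fields; every iteration consumes at least one character,
-- so fuel = n + 1 at the initial call suffices.
def pbOuter (string : String) (cs : List Char) (i : Nat) (acc : List String) : Nat → List String
  | 0 => acc
  | fuel + 1 =>
    let j := pbSkip cs i (cs.length - i)
    if h : j < cs.length then
      if cs[j] = ',' then pbOuter string cs (j + 1) (acc ++ [""]) fuel
      else if cs[j] = ';' then acc
      else
        let k := pbScan cs none false j (cs.length - j)
        let acc1 := acc ++ [PySem.Str.slice string (some (j : Int)) (some (k : Int))]
        if hk : k < cs.length then
          if cs[k] = ',' then pbOuter string cs (k + 1) acc1 fuel else acc1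
        else acc1
    else acc

def parse_gen_alt (string : String) : List String :=
  pbOuter string string.toList 0 [] (string.toList.length + 1)

-- ===== PRECONDITION & SPEC =====
def Spec_parse_gen (string : String) (out : List String) : Prop := out = parse_gen_alt string
instance (string : String) (out : List String) : Decidable (Spec_parse_gen string out) := by unfold Spec_parse_gen; infer_instance

-- ===== CLAIM (what is proved, stated in full; the proofs are below) =====
def Claim_equal_parse_gen : Prop := ∀ (string : String), Dom_parse_gen string → Spec_parse_gen string (parse_gen string)

-- ===== LEMMAS AND PROOFS =====

-- encoding of B's quote flag as A's quota register
def qn : Option Char → Nat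
  | none => 0
  | some c => if c = '\'' then 1 else 2

-- what B's outer loop does after the inner scan stopped at k (field started at s),
-- with fb the fuel left for the remaining fields
def bTail (string : String) (cs : List Char) (fb : Nat) (s k : Nat) (acc : List String) : List String :=
  if _h : k < cs.length then
    if cs[k] = ',' then
      pbOuter string cs (k + 1) (acc ++ [PySem.Str.slice string (some (s : Int)) (some (k : Int))]) fb
    else acc ++ [PySem.Str.slice string (some (s : Int)) (some (k : Int))]
  else acc ++ [PySem.Str.slice string (some (s : Int)) (some (k : Int))]

theorem slice_to_len (string : String) (s : Nat) :
    PySem.Str.slice string (some (s : Int)) none =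
      PySem.Str.slice string (some (s : Int)) (some ((string.toList.length : Nat) : Int)) := by
  apply String.toList_inj.mp
  simp [pysem]

theorem pbSkip_step (cs : List Char) (i : Nat) (hin : i < cs.length)
    (hsp : cs[i] = ' ' ∨ cs[i] = '\t') :
    pbSkip cs i (cs.length - i) = pbSkip cs (i + 1) (cs.length - (i + 1)) := by
  rw [show cs.length - i = (cs.length - (i + 1)) + 1 by omega]
  simp only [pbSkip]
  rw [dif_pos hin, if_pos hsp]

theorem pbSkip_stop (cs : List Char) (i : Nat) (fuel : Nat)
    (h : ∀ (hin : i < cs.length), ¬(cs[i] = ' ' ∨ cs[i] = '\t')) : pbSkip cs i fuel = i := by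
  cases fuel with
  | zero => rfl
  | succ f =>
    simp only [pbSkip]
    split
    · rw [if_neg (h ‹_›)]
    · rfl

theorem pbOuter_congr (string : String) (cs : List Char) (i i' : Nat) (acc : List String)
    (f : Nat) (h : pbSkip cs i (cs.length - i) = pbSkip cs i' (cs.length - i')) :
    pbOuter string cs i acc (f + 1) = pbOuter string cs i' acc (f + 1) := by
  simp only [pbOuter]
  rw [h]

theorem pbOuter_field (string : String) (cs : List Char) (i : Nat) (acc : List String)
    (f : Nat) (hin : i < cs.length) (h1 : ¬(cs[i] = ' ' ∨ cs[i] = '\t'))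
    (h2 : cs[i] ≠ ',') (h3 : cs[i] ≠ ';') :
    pbOuter string cs i acc (f + 1) =
      bTail string cs f i (pbScan cs none false i (cs.length - i)) acc := by
  simp only [pbOuter]
  rw [pbSkip_stop cs i _ (fun _ => h1)]
  rw [dif_pos hin, if_neg h2, if_neg h3]
  rfl

theorem pbScan_none_step (cs : List Char) (esc : Bool) (i : Nat) (hin : i < cs.length)
    (h : ¬(cs[i] = ',' ∨ cs[i] = ';')) :
    pbScan cs none esc i (cs.length - i) =
      if cs[i] = '\'' ∨ cs[i] = '"' then pbScan cs (some cs[i]) esc (i + 1) (cs.length - (i + 1))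
      else pbScan cs none esc (i + 1) (cs.length - (i + 1)) := by
  rw [show cs.length - i = (cs.length - (i + 1)) + 1 by omega]
  simp only [pbScan]
  rw [dif_pos hin]
  rw [if_neg h]

theorem pbScan_some_step (cs : List Char) (q : Char) (esc : Bool) (i : Nat)
    (hin : i < cs.length) :
    pbScan cs (some q) esc i (cs.length - i) =
      if esc then pbScan cs (some q) false (i + 1) (cs.length - (i + 1))
      else if cs[i] = '\\' then pbScan cs (some q) true (i + 1) (cs.length - (i + 1))
      else if cs[i] = q then pbScan cs none false (i + 1) (cs.length - (i + 1))
      else pbScan cs (some q) esc (i + 1) (cs.length - (i + 1)) := by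
  rw [show cs.length - i = (cs.length - (i + 1)) + 1 by omega]
  simp only [pbScan]
  rw [dif_pos hin]

theorem pbScan_none_stop (cs : List Char) (esc : Bool) (i : Nat) (hin : i < cs.length)
    (h : cs[i] = ',' ∨ cs[i] = ';') : pbScan cs none esc i (cs.length - i) = i := by
  rw [show cs.length - i = (cs.length - (i + 1)) + 1 by omega]
  simp only [pbScan]
  rw [dif_pos hin]
  rw [if_pos h]

theorem end_outer (string : String) (acc : List String) (f : Nat) :
    pgLoop string (string.toList.drop string.toList.length) ((string.toList.length : Nat) : Int)
      (-1) 0 0 acc = pbOuter string string.toList string.toList.length acc (f + 1) := by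
  rw [List.drop_length]
  simp only [pgLoop, pgFin]
  rw [if_neg (by norm_num : ¬ (0:Int) ≤ -1)]
  simp only [pbOuter]
  rw [pbSkip_stop string.toList string.toList.length _ (fun hin => absurd hin (by omega))]
  rw [dif_neg (lt_irrefl _)]

theorem end_inner (string : String) (s : Nat) (quote : Option Char) (esc : Bool)
    (acc : List String) (f : Nat) :
    pgLoop string (string.toList.drop string.toList.length) ((string.toList.length : Nat) : Int)
      (s : Int) (qn quote) (if esc then 1 else 0) acc =
      bTail string string.toList f s
        (pbScan string.toList quote esc string.toList.length
          (string.toList.length - string.toList.length)) acc := by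
  rw [List.drop_length]
  simp only [pgLoop, pgFin]
  rw [if_pos (Int.natCast_nonneg s)]
  rw [Nat.sub_self]
  show _ = bTail string string.toList f s string.toList.length acc
  unfold bTail
  rw [dif_neg (lt_irrefl _)]
  rw [slice_to_len]

theorem main_aux (string : String) : ∀ m : Nat,
    (∀ (i : Nat) (acc : List String) (f : Nat), i ≤ string.toList.length →
      string.toList.length - i ≤ m → string.toList.length - i < f →
      pgLoop string (string.toList.drop i) (i : Int) (-1) 0 0 acc = pbOuter string string.toList i acc f) ∧
    (∀ (i s : Nat) (quote : Option Char) (esc : Bool) (acc : List String) (f : Nat),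
      s < i → i ≤ string.toList.length →
      (quote = none ∨ quote = some '\'' ∨ quote = some '"') →
      (quote = none → esc = false) →
      string.toList.length - i ≤ m → string.toList.length - i ≤ f →
      pgLoop string (string.toList.drop i) (i : Int) (s : Int) (qn quote) (if esc then 1 else 0) acc =
        bTail string string.toList f s (pbScan string.toList quote esc i (string.toList.length - i)) acc) := by
  intro m
  induction m with
  | zero =>
    constructor
    · intro i acc f hi hm hf
      obtain ⟨f', rfl⟩ : ∃ f', f = f' + 1 := ⟨f - 1, by omega⟩
      have hieq : i = string.toList.length := by omega
      subst hieq
      exact end_outer string acc f'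
    · intro i s quote esc acc f hs hi hquote hesc hm hf
      have hieq : i = string.toList.length := by omega
      subst hieq
      exact end_inner string s quote esc acc f
  | succ m ih =>
    obtain ⟨ihO, ihI⟩ := ih
    have hca : ∀ i : Nat, ((i : Int) + 1) = ((i + 1 : Nat) : Int) := by intro i; push_cast; ring
    constructor
    · -- outer loop
      intro i acc f hi hm hf
      obtain ⟨f', rfl⟩ : ∃ f', f = f' + 1 := ⟨f - 1, by omega⟩
      by_cases hin : i < string.toList.length
      case neg =>
        have hieq : i = string.toList.length := by omega
        subst hieq
        exact end_outer string acc f'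
      case pos =>
        rw [List.drop_eq_getElem_cons hin]
        by_cases hsp : string.toList[i] = ' ' ∨ string.toList[i] = '\t'
        · -- skip whitespace
          simp only [pgLoop]
          rw [if_pos ⟨by norm_num, hsp⟩, hca i]
          rw [ihO (i + 1) acc (f' + 1) (by omega) (by omega) (by omega)]
          exact (pbOuter_congr string string.toList (i + 1) i acc f'
            (pbSkip_step string.toList i hin hsp).symm)
        · have hskip := pbSkip_stop string.toList i (string.toList.length - i) (fun _ => hsp)
          by_cases hcm : string.toList[i] = ','
          · -- empty field
            simp only [pgLoop]
            rw [if_neg (fun h => hsp h.2), if_pos ⟨by norm_num, hcm⟩, hca i]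
            rw [ihO (i + 1) (acc ++ [""]) f' (by omega) (by omega) (by omega)]
            conv_rhs => simp only [pbOuter]
            rw [hskip, dif_pos hin, if_pos hcm]
          · by_cases hsc : string.toList[i] = ';'
            · -- comment: stop
              simp only [pgLoop]
              rw [if_neg (fun h => hsp h.2), if_neg (fun h => hcm h.2), if_pos ⟨by norm_num, hsc⟩]
              simp only [pgFin]
              rw [if_neg (by norm_num : ¬ (0:Int) ≤ -1)]
              conv_rhs => simp only [pbOuter]
              rw [hskip, dif_pos hin, if_neg hcm, if_pos hsc]
            · -- start of a field
              simp only [pgLoop]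
              rw [if_neg (fun h => hsp h.2), if_neg (fun h => hcm h.2), if_neg (fun h => hsc h.2)]
              have hstart : (if ((-1):Int) < 0 then (i : Int) else -1) = (i : Int) :=
                if_pos (by norm_num)
              rw [hstart, if_pos trivial, if_neg hcm, if_neg hsc]
              rw [pbOuter_field string string.toList i acc f' hin hsp hcm hsc]
              rw [pbScan_none_step string.toList false i hin (by tauto)]
              by_cases hq1 : string.toList[i] = '\''
              · rw [if_pos hq1, hca i, hq1]
                have h := ihI (i + 1) i (some '\'') false acc f' (by omega) (by omega)
                  (Or.inr (Or.inl rfl)) (by simp) (by omega) (by omega)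
                rw [if_pos (Or.inl rfl)]
                simpa [qn] using h
              · by_cases hq2 : string.toList[i] = '"'
                · rw [if_neg hq1, if_pos hq2, hca i, hq2]
                  have h := ihI (i + 1) i (some '"') false acc f' (by omega) (by omega)
                    (Or.inr (Or.inr rfl)) (by simp) (by omega) (by omega)
                  rw [if_pos (Or.inr rfl)]
                  simpa [qn] using h
                · rw [if_neg hq1, if_neg hq2, hca i]
                  have h := ihI (i + 1) i none false acc f' (by omega) (by omega)
                    (Or.inl rfl) (fun _ => rfl) (by omega) (by omega)
                  simpa [qn, hq1, hq2] using h
    · -- inner scan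
      intro i s quote esc acc f hs hi hquote hesc hm hf
      by_cases hin : i < string.toList.length
      case neg =>
        have hieq : i = string.toList.length := by omega
        subst hieq
        exact end_inner string s quote esc acc f
      case pos =>
        rw [List.drop_eq_getElem_cons hin]
        simp only [pgLoop]
        rw [if_neg (fun h => absurd h.1 (by omega)), if_neg (fun h => absurd h.1 (by omega)),
            if_neg (fun h => absurd h.1 (by omega))]
        have hstart : (if ((s : Int)) < 0 then (i : Int) else (s : Int)) = (s : Int) :=
          if_neg (by omega)
        rw [hstart]
        rcases hquote with hq | hq | hq
        · -- quote = none
          subst hq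
          have hesc' := hesc rfl
          subst hesc'
          rw [if_pos (show qn none = 0 from rfl)]
          by_cases hcm : string.toList[i] = ','
          · rw [if_pos hcm, hca i]
            rw [ihO (i + 1) _ f (by omega) (by omega) (by omega)]
            rw [pbScan_none_stop string.toList false i hin (Or.inl hcm)]
            unfold bTail
            rw [dif_pos hin, if_pos hcm]
          · by_cases hsc : string.toList[i] = ';'
            · rw [if_neg hcm, if_pos hsc]
              rw [if_pos (show ((i : Int)) ≠ ((s : Int)) by omega)]
              simp only [pgFin]
              rw [if_neg (by norm_num : ¬ (0:Int) ≤ -1)]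
              rw [pbScan_none_stop string.toList false i hin (Or.inr hsc)]
              unfold bTail
              rw [dif_pos hin, if_neg hcm]
            · rw [if_neg hcm, if_neg hsc]
              rw [pbScan_none_step string.toList false i hin (by tauto)]
              by_cases hq1 : string.toList[i] = '\''
              · rw [if_pos hq1, hca i, hq1]
                have h := ihI (i + 1) s (some '\'') false acc f (by omega) (by omega)
                  (Or.inr (Or.inl rfl)) (by simp) (by omega) (by omega)
                rw [if_pos (Or.inl rfl)]
                simpa [qn] using h
              · by_cases hq2 : string.toList[i] = '"'
                · rw [if_neg hq1, if_pos hq2, hca i, hq2]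
                  have h := ihI (i + 1) s (some '"') false acc f (by omega) (by omega)
                    (Or.inr (Or.inr rfl)) (by simp) (by omega) (by omega)
                  rw [if_pos (Or.inr rfl)]
                  simpa [qn] using h
                · rw [if_neg hq1, if_neg hq2, hca i]
                  have h := ihI (i + 1) s none false acc f (by omega) (by omega)
                    (Or.inl rfl) (fun _ => rfl) (by omega) (by omega)
                  simpa [qn, hq1, hq2] using h
        · -- quote = '\''  (quota = 1)
          subst hq
          rw [if_neg (show ¬ qn (some '\'') = 0 by decide)]
          rw [pbScan_some_step string.toList '\'' esc i hin]
          cases esc with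
          | true =>
            rw [show (if (true : Bool) then 1 else 0 : Nat) = 1 from rfl]
            rw [if_pos (show (1:Nat) ≠ 0 by decide), hca i]
            rw [if_pos (show (true : Bool) = true from rfl)]
            have h := ihI (i + 1) s (some '\'') false acc f (by omega) (by omega)
              (Or.inr (Or.inl rfl)) (by simp) (by omega) (by omega)
            simpa [qn] using h
          | false =>
            rw [show (if (false : Bool) then 1 else 0 : Nat) = 0 from rfl]
            rw [if_neg (show ¬ (0:Nat) ≠ 0 by decide)]
            rw [if_neg (show ¬ (false : Bool) = true by decide)]
            by_cases hbs : string.toList[i] = '\\'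
            · rw [if_pos hbs, if_pos hbs, hca i]
              have h := ihI (i + 1) s (some '\'') true acc f (by omega) (by omega)
                (Or.inr (Or.inl rfl)) (by simp) (by omega) (by omega)
              simpa [qn] using h
            · rw [if_neg hbs, if_neg hbs]
              rw [if_pos (show qn (some '\'') = 1 from rfl)]
              by_cases hq1 : string.toList[i] = '\''
              · rw [if_pos hq1, if_pos hq1, hca i]
                have h := ihI (i + 1) s none false acc f (by omega) (by omega)
                  (Or.inl rfl) (fun _ => rfl) (by omega) (by omega)
                simpa [qn] using h
              · rw [if_neg hq1, if_neg hq1, hca i]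
                have h := ihI (i + 1) s (some '\'') false acc f (by omega) (by omega)
                  (Or.inr (Or.inl rfl)) (by simp) (by omega) (by omega)
                simpa [qn] using h
        · -- quote = '"'  (quota = 2)
          subst hq
          rw [if_neg (show ¬ qn (some '"') = 0 by decide)]
          rw [pbScan_some_step string.toList '"' esc i hin]
          cases esc with
          | true =>
            rw [show (if (true : Bool) then 1 else 0 : Nat) = 1 from rfl]
            rw [if_pos (show (1:Nat) ≠ 0 by decide), hca i]
            rw [if_pos (show (true : Bool) = true from rfl)]
            have h := ihI (i + 1) s (some '"') false acc f (by omega) (by omega)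
              (Or.inr (Or.inr rfl)) (by simp) (by omega) (by omega)
            simpa [qn] using h
          | false =>
            rw [show (if (false : Bool) then 1 else 0 : Nat) = 0 from rfl]
            rw [if_neg (show ¬ (0:Nat) ≠ 0 by decide)]
            rw [if_neg (show ¬ (false : Bool) = true by decide)]
            by_cases hbs : string.toList[i] = '\\'
            · rw [if_pos hbs, if_pos hbs, hca i]
              have h := ihI (i + 1) s (some '"') true acc f (by omega) (by omega)
                (Or.inr (Or.inr rfl)) (by simp) (by omega) (by omega)
              simpa [qn] using h
            · rw [if_neg hbs, if_neg hbs]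
              rw [if_neg (show ¬ qn (some '"') = 1 by decide)]
              by_cases hq1 : string.toList[i] = '"'
              · rw [if_pos hq1, if_pos hq1, hca i]
                have h := ihI (i + 1) s none false acc f (by omega) (by omega)
                  (Or.inl rfl) (fun _ => rfl) (by omega) (by omega)
                simpa [qn] using h
              · rw [if_neg hq1, if_neg hq1, hca i]
                have h := ihI (i + 1) s (some '"') false acc f (by omega) (by omega)
                  (Or.inr (Or.inr rfl)) (by simp) (by omega) (by omega)
                simpa [qn] using h

theorem main_equiv : ∀ (string : String) (i : Nat) (acc : List String),
    i ≤ string.toList.length →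
    pgLoop string (string.toList.drop i) (i : Int) (-1) 0 0 acc =
      pbOuter string string.toList i acc (string.toList.length + 1) := by
  intro string i acc h
  exact (main_aux string (string.toList.length - i)).1 i acc (string.toList.length + 1) h
    (le_refl _) (by omega)

-- ===== VERDICT (by name: the statement is the Claim_ definition above) =====
theorem parse_gen_spec : Claim_equal_parse_gen := by
  intro string _
  unfold Spec_parse_gen parse_gen parse_gen_alt
  simpa using main_equiv string 0 [] (Nat.zero_le _)
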